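-- pv_equiv track=rewrite | github.com/kcyh7428/K2Bi | scripts/lib/strategy_frontmatter.py | has_section
-- ===== SOURCE A (Python) =====
-- def has_section(body: str, heading: str) -> bool:
--     """Return True if `body` contains a top-level `## <heading>` section.
--
--     Matching is case-insensitive on the heading text. To avoid
--     prefix-collisions (`## Backtest Overrides Pending` matching
--     `heading="Backtest Override"`), suffix characters are restricted:
--     an exact match, a match followed by whitespace, or a match
--     followed by an opening paren all count (so
--     `## Backtest Override (2026-04-19)` still matches). A match
--     followed by any other non-word character would also be safe but
--     the two-allowed-suffixes rule covers every shape we've authored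
--     and keeps the function narrow. Closes Codex R7 R2 #3.
--
--     Used by the Bundle 4 cycle 5 `/invest-ship --approve-strategy`
--     backtest-gate override check + by `invest_thesis` for idempotent
--     heading probes.
--     """
--     target = heading.strip().lower()
--     target_sp = target + " "
--     target_paren = target + "("
--     for line in body.splitlines():
--         # Require the heading at column 0 -- an indented `    ## foo`
--         # is a code-block line, not a real section. Prior behavior
--         # stripped leading whitespace first and would be satisfied by
--         # a pasted snippet in fenced code. Closes Codex R7 R4 #2.
--         if not line.startswith("## "):
--             continue
--         rest = line[3:].strip().lower()
--         if rest == target: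
--             return True
--         if rest.startswith(target_sp) or rest.startswith(target_paren):
--             return True
--     return False
-- ===== SOURCE B (Python) =====
-- def has_section(body: str, heading: str) -> bool:
--     """Single left-to-right scan of `body` (no splitlines, no per-line
--     strip/lower copies): at each line start a small cursor automaton tries
--     '## ', optional blanks, the case-folded heading, then an allowed suffix."""
--     target = heading.strip().lower()
--     n = len(body)
--     i = 0  # invariant: i is the start of a line
--     while True:
--         if _match_at(body, i, n, target):
--             return True
--         # advance the cursor to the start of the next line
--         while i < n and body[i] not in "\r\n":
--             i += 1
--         if i >= n:
--             return False
--         if body[i] == "\r" and i + 1 < n and body[i + 1] == "\n":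
--             i += 2
--         else:
--             i += 1
--
--
-- def _match_at(s, i, n, target):
--     # '## ' at the line start
--     if not s.startswith("## ", i):
--         return False
--     k = i + 3
--     while k < n and s[k] in " \t":
--         k += 1
--     # the heading text, case-folded on the fly; a line break ends the line
--     for ch in target:
--         if k >= n or s[k] in "\r\n" or s[k].lower() != ch:
--             return False
--         k += 1
--     # allowed suffix: end of line, ' ', '(' -- or only trailing blanks
--     if k >= n or s[k] in "\r\n( ":
--         return True
--     while k < n and s[k] in " \t":
--         k += 1
--     return k >= n or s[k] in "\r\n"
-- ===== Notes on version B (the rewrite author's own statement) =====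
-- stated objective: alternative
-- what changed: Replaced the splitlines loop with its per-line strip/lower/slice copies and three string concatenations+comparisons by a single left-to-right cursor scan of the raw body that matches '## ', optional blanks, the case-folded heading and an allowed suffix in place, allocating no intermediate strings.
import Mathlib
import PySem

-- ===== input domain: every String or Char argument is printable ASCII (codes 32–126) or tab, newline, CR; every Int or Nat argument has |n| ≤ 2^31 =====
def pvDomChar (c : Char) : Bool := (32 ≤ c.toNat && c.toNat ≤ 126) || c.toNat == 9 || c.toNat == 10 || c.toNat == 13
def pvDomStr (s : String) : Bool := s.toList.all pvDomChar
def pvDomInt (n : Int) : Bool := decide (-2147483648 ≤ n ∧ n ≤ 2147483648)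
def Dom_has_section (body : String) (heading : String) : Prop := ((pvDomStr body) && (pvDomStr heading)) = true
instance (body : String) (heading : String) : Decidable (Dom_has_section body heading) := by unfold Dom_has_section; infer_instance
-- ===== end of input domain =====

-- B replaces A's splitlines loop (per-line slice/strip/lower copies, three comparisons against
-- concatenated targets) by a single left-to-right cursor scan of the raw body; an alternative
-- of the same cost, proved to return the same Bool on the stated domain.

-- ===== PORT A =====
-- the `for line in body.splitlines()` loop with its `continue`s and early `return True`s
def hasSecLoop (target target_sp target_paren : List Char) : List (List Char) → Bool
  | [] => false
  | line :: lines =>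
    if !(PySem.Chars.startswith line ['#', '#', ' ']) then
      hasSecLoop target target_sp target_paren lines
    else
      -- rest = line[3:].strip().lower()
      let rest := PySem.Chars.lower (PySem.Chars.strip (PySem.Chars.slice line (some 3) none))
      if rest == target then true
      else if PySem.Chars.startswith rest target_sp || PySem.Chars.startswith rest target_paren then true
      else hasSecLoop target target_sp target_paren lines

def has_section (body : String) (heading : String) : Bool :=
  let target := PySem.Chars.lower (PySem.Chars.strip heading.toList)
  let target_sp := target ++ [' ']
  let target_paren := target ++ ['(']
  hasSecLoop target target_sp target_paren (PySem.Chars.splitlines body.toList)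

-- ===== PORT B =====
def bIsBreak (c : Char) : Bool := c == '\r' || c == '\n'
def bIsBlank (c : Char) : Bool := c == ' ' || c == '\t'

-- the `for ch in target` loop of _match_at; the index cursor k is rendered as the
-- remaining suffix of s (exact: the loop only moves k forward one char at a time)
def bMatchTarget : List Char → List Char → Option (List Char)
  | s, [] => some s
  | [], _ :: _ => none
  | c :: s, ch :: tgt =>
    if bIsBreak c || !(PySem.Chars.lowerChar c == ch) then none
    else bMatchTarget s tgt

-- _match_at(s, i, n, target) with s the suffix of the body starting at the line start i
def bMatchAt (target s : List Char) : Bool :=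
  if !(PySem.Chars.startswith s ['#', '#', ' ']) then false
  else
    let u := (s.drop 3).dropWhile bIsBlank           -- `while k < n and s[k] in " \t"`
    match bMatchTarget u target with
    | none => false
    | some v =>
      match v with
      | [] => true                                    -- k >= n
      | c :: _ =>
        if bIsBreak c || c == '(' || c == ' ' then true    -- s[k] in "\r\n( "
        else
          match v.dropWhile bIsBlank with             -- trailing `while ... in " \t"`
          | [] => true
          | d :: _ => bIsBreak d                      -- k >= n or s[k] in "\r\n"

-- the outer `while True` loop; the cursor i (always a line start) is the remaining suffix
def bScan (target : List Char) (s : List Char) : Bool :=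
  if bMatchAt target s then true
  else
    match h : s.dropWhile (fun c => !(bIsBreak c)) with   -- advance to the line break
    | [] => false
    | '\r' :: '\n' :: r => bScan target r                 -- skip CRLF
    | _ :: r => bScan target r                            -- skip a lone break
termination_by s.length
decreasing_by
  · have h1 := List.length_dropWhile_le (fun c => !(bIsBreak c)) s
    rw [h] at h1; simp at h1; omega
  · have h1 := List.length_dropWhile_le (fun c => !(bIsBreak c)) s
    rw [h] at h1; simp at h1; omega

def has_section_alt (body : String) (heading : String) : Bool :=
  let target := PySem.Chars.lower (PySem.Chars.strip heading.toList)
  bScan target body.toList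

-- ===== PRECONDITION & SPEC =====
def Spec_has_section (body : String) (heading : String) (out : Bool) : Prop := out = has_section_alt body heading
instance (body : String) (heading : String) (out : Bool) : Decidable (Spec_has_section body heading out) := by unfold Spec_has_section; infer_instance

-- ===== CLAIM (what is proved, stated in full; the proofs are below) =====
def Claim_equal_has_section : Prop := ∀ (body : String) (heading : String), Dom_has_section body heading → Spec_has_section body heading (has_section body heading)

-- ===== LEMMAS AND PROOFS =====

-- ---- character-class lemmas ----
theorem lowerChar_toNat (c : Char) :
    (PySem.Chars.lowerChar c).toNat = if 65 ≤ c.toNat ∧ c.toNat ≤ 90 then c.toNat + 32 else c.toNat := by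
  have hA : ('A' ≤ c) ↔ (65 ≤ c.toNat) := by
    rw [Char.le_def, UInt32.le_iff_toNat_le]; exact Iff.rfl
  have hZ : (c ≤ 'Z') ↔ (c.toNat ≤ 90) := by
    rw [Char.le_def, UInt32.le_iff_toNat_le]; exact Iff.rfl
  simp only [PySem.Chars.lowerChar, PySem.Chars.isupper]
  split_ifs with h1 h2 h2
  · rw [Char.toNat_ofNat, if_pos]
    left; omega
  · simp only [Bool.and_eq_true, decide_eq_true_eq, hA, hZ] at h1; omega
  · simp only [Bool.and_eq_true, decide_eq_true_eq, hA, hZ] at h1; exact absurd ⟨hA.2 h2.1, hZ.2 h2.2⟩ h1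
  · rfl

theorem lowerChar_eq_self_of_not_upper (c : Char) (h : ¬ (65 ≤ c.toNat ∧ c.toNat ≤ 90)) :
    PySem.Chars.lowerChar c = c := by
  have hA : ('A' ≤ c) ↔ (65 ≤ c.toNat) := by
    rw [Char.le_def, UInt32.le_iff_toNat_le]; exact Iff.rfl
  have hZ : (c ≤ 'Z') ↔ (c.toNat ≤ 90) := by
    rw [Char.le_def, UInt32.le_iff_toNat_le]; exact Iff.rfl
  simp only [PySem.Chars.lowerChar, PySem.Chars.isupper]
  rw [if_neg]
  simp only [Bool.and_eq_true, decide_eq_true_eq, hA, hZ]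
  omega

theorem char_eq_iff_toNat (c d : Char) : c = d ↔ c.toNat = d.toNat := by
  constructor
  · intro h; rw [h]
  · intro h; apply Char.ext; exact UInt32.toNat_inj.mp h

theorem isspace_lowerChar (c : Char) : PySem.Chars.isspace (PySem.Chars.lowerChar c) = PySem.Chars.isspace c := by
  have h2 := lowerChar_toNat c
  simp only [PySem.Chars.isspace, h2]
  split_ifs with h
  · rw [Bool.eq_iff_iff]
    simp only [Bool.or_eq_true, Bool.and_eq_true, decide_eq_true_eq]
    omega
  · rfl

theorem lowerChar_eq_space (c : Char) : (PySem.Chars.lowerChar c = ' ') ↔ c = ' ' := by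
  by_cases h : 65 ≤ c.toNat ∧ c.toNat ≤ 90
  · have h2 := lowerChar_toNat c
    rw [if_pos h] at h2
    have rs : (' ' : Char).toNat = 32 := rfl
    simp only [char_eq_iff_toNat, h2, rs]
    omega
  · rw [lowerChar_eq_self_of_not_upper c h]

theorem lowerChar_eq_paren (c : Char) : (PySem.Chars.lowerChar c = '(') ↔ c = '(' := by
  by_cases h : 65 ≤ c.toNat ∧ c.toNat ≤ 90
  · have h2 := lowerChar_toNat c
    rw [if_pos h] at h2
    have rp : ('(' : Char).toNat = 40 := rfl
    simp only [char_eq_iff_toNat, h2, rp]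
    omega
  · rw [lowerChar_eq_self_of_not_upper c h]

-- the line-break predicate of Python's str.splitlines (as in PySem.Chars.splitlines)
def pyB : Char → Bool := fun c =>
  have n := c.toNat
  decide (n = 10) || decide (n = 13) || decide (n = 11) || decide (n = 12) || decide (n = 28) || decide (n = 29) ||
    decide (n = 30) || decide (n = 133) || decide (n = 8232) || decide (n = 8233)

theorem splitlines_eq_go (s : List Char) :
    PySem.Chars.splitlines s = PySem.Chars.splitlines.go pyB s [] [] := rfl

theorem dom_pyB (c : Char) (h : pvDomChar c = true) : pyB c = bIsBreak c := by
  have r13 : ('\r' : Char).toNat = 13 := rfl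
  have n10 : ('\n' : Char).toNat = 10 := rfl
  simp only [pvDomChar, Bool.or_eq_true, Bool.and_eq_true, decide_eq_true_eq, beq_iff_eq] at h
  simp only [pyB, bIsBreak]
  rw [Bool.eq_iff_iff]
  simp only [Bool.or_eq_true, decide_eq_true_eq, beq_iff_eq, char_eq_iff_toNat, r13, n10]
  omega

theorem dom_isspace (c : Char) (h : pvDomChar c = true) (hb : bIsBreak c = false) :
    PySem.Chars.isspace c = bIsBlank c := by
  have r13 : ('\r' : Char).toNat = 13 := rfl
  have n10 : ('\n' : Char).toNat = 10 := rfl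
  have rs : (' ' : Char).toNat = 32 := rfl
  have rt : ('\t' : Char).toNat = 9 := rfl
  simp only [pvDomChar, Bool.or_eq_true, Bool.and_eq_true, decide_eq_true_eq, beq_iff_eq] at h
  simp only [bIsBreak, Bool.or_eq_false_iff, beq_eq_false_iff_ne, ne_eq, char_eq_iff_toNat, r13, n10] at hb
  simp only [PySem.Chars.isspace, bIsBlank]
  rw [Bool.eq_iff_iff]
  simp only [Bool.or_eq_true, Bool.and_eq_true, decide_eq_true_eq, beq_iff_eq, char_eq_iff_toNat, rs, rt]
  omega

-- ---- lower / strip structure lemmas ----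
theorem hfun_isspace : (PySem.Chars.isspace ∘ PySem.Chars.lowerChar) = PySem.Chars.isspace := by
  funext c; exact isspace_lowerChar c

theorem lower_rstrip (x : List Char) : PySem.Chars.lower (PySem.Chars.rstrip x) = PySem.Chars.rstrip (PySem.Chars.lower x) := by
  simp only [PySem.Chars.lower, PySem.Chars.rstrip, List.dropWhile_map, ← List.map_reverse, hfun_isspace]

theorem rstrip_append (x y : List Char) :
    PySem.Chars.rstrip (x ++ y) =
      if PySem.Chars.rstrip y = [] then PySem.Chars.rstrip x else x ++ PySem.Chars.rstrip y := by
  simp only [PySem.Chars.rstrip, List.reverse_append, List.dropWhile_append, List.reverse_eq_nil_iff]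
  split_ifs with h1 h2 h2
  · rfl
  · exact absurd (List.isEmpty_iff.mp h1) h2
  · exact absurd h2 (by simpa using h1)
  · simp

theorem rstrip_prefix (x : List Char) : PySem.Chars.rstrip x <+: x := by
  simp only [PySem.Chars.rstrip]
  have := List.dropWhile_suffix (l := x.reverse) PySem.Chars.isspace
  rw [← List.reverse_prefix] at this
  simpa using this

theorem rstrip_idem (x : List Char) : PySem.Chars.rstrip (PySem.Chars.rstrip x) = PySem.Chars.rstrip x := by
  simp only [PySem.Chars.rstrip, List.reverse_reverse, List.dropWhile_idempotent]

theorem rstrip_eq_nil (x : List Char) : PySem.Chars.rstrip x = [] ↔ ∀ c ∈ x, PySem.Chars.isspace c = true := by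
  simp only [PySem.Chars.rstrip, List.reverse_eq_nil_iff, List.dropWhile_eq_nil_iff, List.mem_reverse]

theorem rstrip_singleton (c : Char) : PySem.Chars.rstrip [c] = if PySem.Chars.isspace c then [] else [c] := by
  simp only [PySem.Chars.rstrip, List.reverse_singleton, List.dropWhile]
  split_ifs <;> simp_all

theorem rstrip_target (h : List Char) :
    PySem.Chars.rstrip (PySem.Chars.lower (PySem.Chars.strip h)) = PySem.Chars.lower (PySem.Chars.strip h) := by
  simp only [PySem.Chars.strip, lower_rstrip, rstrip_idem]

-- ---- splitlines.go structure ----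
theorem go_cons_pair (isB : Char → Bool) (rest cur : List Char) (acc : List (List Char)) :
    PySem.Chars.splitlines.go isB ('\r' :: '\n' :: rest) cur acc =
      PySem.Chars.splitlines.go isB rest [] (cur.reverse :: acc) := rfl

theorem go_cons_gen (isB : Char → Bool) (c : Char) (rest cur : List Char) (acc : List (List Char))
    (h : ¬(c = '\r' ∧ ∃ r, rest = '\n' :: r)) :
    PySem.Chars.splitlines.go isB (c :: rest) cur acc =
      if isB c then PySem.Chars.splitlines.go isB rest [] (cur.reverse :: acc)
      else PySem.Chars.splitlines.go isB rest (c :: cur) acc := by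
  rw [PySem.Chars.splitlines.go.eq_def]
  split
  next heq => cases heq
  next heq =>
    injection heq with h1 h2
    exact absurd ⟨h1, by rw [h2]; exact ⟨_, rfl⟩⟩ h
  next c' rest' heq =>
    injection heq with h1 h2
    subst h1; subst h2
    rfl

-- tail of the body after the first line's break sequence
def slTail : List Char → List Char
  | [] => []
  | '\r' :: '\n' :: r => r
  | _ :: r => r

theorem slTail_pair (r : List Char) : slTail ('\r' :: '\n' :: r) = r := rfl

theorem slTail_gen (c : Char) (rest : List Char) (h : ¬(c = '\r' ∧ ∃ r, rest = '\n' :: r)) :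
    slTail (c :: rest) = rest := by
  rw [slTail.eq_def]
  split
  next heq => cases heq
  next heq =>
    injection heq with h1 h2
    exact absurd ⟨h1, by rw [h2]; exact ⟨_, rfl⟩⟩ h
  next heq =>
    injection heq with h1 h2
    rw [h2]

theorem slTail_tail_suffix (c : Char) (r : List Char) : slTail (c :: r) <:+ r := by
  rw [slTail.eq_def]
  split
  next heq => cases heq
  next rr heq =>
    injection heq with h1 h2
    subst h2
    exact List.suffix_cons '\n' rr
  next heq =>
    injection heq with h1 h2
    subst h2
    exact List.suffix_refl r

theorem go_acc (isB : Char → Bool) :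
    ∀ (s cur : List Char) (_accd : List (List Char)) (acc : List (List Char)),
      PySem.Chars.splitlines.go isB s cur acc = acc.reverse ++ PySem.Chars.splitlines.go isB s cur [] := by
  apply PySem.Chars.splitlines.go.induct isB
    (motive := fun s cur _ => ∀ acc, PySem.Chars.splitlines.go isB s cur acc = acc.reverse ++ PySem.Chars.splitlines.go isB s cur [])
  · intro cur acc h acc'
    simp [PySem.Chars.splitlines.go, h]
  · intro cur acc h acc'
    simp [PySem.Chars.splitlines.go, h]
  · intro rest cur acc ih acc'
    simp only [go_cons_pair]
    rw [ih]
    conv_rhs => rw [ih]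
    simp
  · intro c rest cur acc hnot hb ih acc'
    have h' : ¬(c = '\r' ∧ ∃ r, rest = '\n' :: r) := by
      rintro ⟨hc, r, hr⟩; exact hnot r hc hr
    simp only [go_cons_gen isB c rest cur _ h', if_pos hb]
    rw [ih]
    conv_rhs => rw [ih]
    simp
  · intro c rest cur acc hnot hb ih acc'
    have h' : ¬(c = '\r' ∧ ∃ r, rest = '\n' :: r) := by
      rintro ⟨hc, r, hr⟩; exact hnot r hc hr
    simp only [go_cons_gen isB c rest cur _ h', if_neg hb]
    rw [ih]

theorem go_closed :
    ∀ (s cur : List Char) (_accd : List (List Char)),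
      PySem.Chars.splitlines.go pyB s cur [] =
        if cur.isEmpty && s.isEmpty then []
        else (cur.reverse ++ s.takeWhile (fun c => !(pyB c))) ::
             PySem.Chars.splitlines.go pyB (slTail (s.dropWhile (fun c => !(pyB c)))) [] [] := by
  apply PySem.Chars.splitlines.go.induct pyB
    (motive := fun s cur _ =>
      PySem.Chars.splitlines.go pyB s cur [] =
        if cur.isEmpty && s.isEmpty then []
        else (cur.reverse ++ s.takeWhile (fun c => !(pyB c))) ::
             PySem.Chars.splitlines.go pyB (slTail (s.dropWhile (fun c => !(pyB c)))) [] [])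
  · intro cur acc h
    simp [PySem.Chars.splitlines.go, List.isEmpty_iff.mp h]
  · intro cur acc h
    simp only [PySem.Chars.splitlines.go]
    rw [if_neg h]
    simp only [Bool.and_eq_true] at *
    simp [h]
    rfl
  · intro rest cur acc ih
    rw [go_cons_pair]
    rw [go_acc pyB rest [] [] [cur.reverse]]
    have hP : (fun c => !(pyB c)) '\r' = false := by decide
    simp only [List.takeWhile_cons, List.dropWhile_cons, hP, Bool.false_eq_true, if_false]
    rw [slTail_pair]
    simp
  · intro c rest cur acc hnot hb ih
    have h' : ¬(c = '\r' ∧ ∃ r, rest = '\n' :: r) := by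
      rintro ⟨hc, r, hr⟩; exact hnot r hc hr
    rw [go_cons_gen pyB c rest cur [] h', if_pos hb]
    rw [go_acc pyB rest [] [] [cur.reverse]]
    simp only [List.takeWhile_cons, List.dropWhile_cons, hb, Bool.not_true, Bool.false_eq_true, if_false]
    rw [slTail_gen c rest h']
    simp
  · intro c rest cur acc hnot hb ih
    have h' : ¬(c = '\r' ∧ ∃ r, rest = '\n' :: r) := by
      rintro ⟨hc, r, hr⟩; exact hnot r hc hr
    rw [go_cons_gen pyB c rest cur [] h', if_neg hb]
    rw [ih]
    have hb' : pyB c = false := by simpa using hb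
    simp only [List.takeWhile_cons, List.dropWhile_cons, hb', Bool.not_false, if_pos]
    simp

-- what A's loop body decides for one line
def pyTest (target target_sp target_paren line : List Char) : Bool :=
  if !(PySem.Chars.startswith line ['#', '#', ' ']) then false
  else
    let rest := PySem.Chars.lower (PySem.Chars.strip (PySem.Chars.slice line (some 3) none))
    if rest == target then true
    else PySem.Chars.startswith rest target_sp || PySem.Chars.startswith rest target_paren

theorem hasSecLoop_cons (t sp pa line : List Char) (L : List (List Char)) :
    hasSecLoop t sp pa (line :: L) = (pyTest t sp pa line || hasSecLoop t sp pa L) := by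
  simp only [hasSecLoop, pyTest]
  split_ifs <;> simp_all

theorem head_dropWhile_false (p : Char → Bool) (l r : List Char) (d : Char) (h : l.dropWhile p = d :: r) : p d = false := by
  induction l with
  | nil => cases h
  | cons a t ih =>
    rw [List.dropWhile_cons] at h
    split_ifs at h with hp
    · exact ih h
    · injection h with h1 _; subst h1; simpa using hp

theorem dropWhile_congr_mem {p q : Char → Bool} (l : List Char) (h : ∀ c ∈ l, p c = q c) :
    l.dropWhile p = l.dropWhile q := by
  induction l with
  | nil => rfl
  | cons a t ih =>
    rw [List.dropWhile_cons, List.dropWhile_cons, h a (by simp)]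
    split_ifs <;> [exact ih fun c hc => h c (by simp [hc]); rfl]

theorem prefix_takeWhile_iff (P : Char → Bool) (p : List Char) (hp : ∀ c ∈ p, P c = true) :
    ∀ s : List Char, (p <+: s ↔ p <+: s.takeWhile P) := by
  induction p with
  | nil => intro s; simp
  | cons a t ih =>
    intro s
    cases s with
    | nil => simp [List.takeWhile]
    | cons c s' =>
      rw [List.takeWhile_cons]
      by_cases hac : a = c
      · subst hac
        rw [hp a (by simp), if_pos rfl]
        simp only [List.cons_prefix_cons, true_and]
        exact ih (fun c hc => hp c (by simp [hc])) s'
      · constructor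
        · intro h; exact absurd (List.cons_prefix_cons.mp h).1 hac
        · intro h
          split_ifs at h
          · exact absurd (List.cons_prefix_cons.mp h).1 hac
          · exact absurd h (by simp)

-- ---- the matcher ----
theorem bMatchTarget_spec (target u₀ rest : List Char)
    (hu : ∀ c ∈ u₀, bIsBreak c = false)
    (hr : rest = [] ∨ ∃ d r', rest = d :: r' ∧ bIsBreak d = true) :
    bMatchTarget (u₀ ++ rest) target =
      if target <+: PySem.Chars.lower u₀ then some (u₀.drop target.length ++ rest) else none := by
  induction target generalizing u₀ with
  | nil => simp [bMatchTarget]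
  | cons ch tgt ih =>
    cases u₀ with
    | nil =>
      rcases hr with hre | ⟨d, r', hre, hd⟩
      · subst hre; simp [bMatchTarget, PySem.Chars.lower]
      · subst hre
        simp [bMatchTarget, hd, PySem.Chars.lower]
    | cons c u₀' =>
      have hc := hu c (by simp)
      simp only [List.cons_append, bMatchTarget, hc, Bool.false_or]
      by_cases hlc : PySem.Chars.lowerChar c = ch
      · rw [if_neg (by simp [hlc])]
        rw [ih u₀' (fun x hx => hu x (by simp [hx])) ]
        simp [PySem.Chars.lower, List.cons_prefix_cons, hlc]
      · rw [if_pos (by simp [hlc])]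
        rw [if_neg]
        simp only [PySem.Chars.lower, List.map_cons, List.cons_prefix_cons]
        intro ⟨h1, _⟩
        exact hlc h1.symm

theorem break_not_blank (c : Char) (h : bIsBreak c = true) : bIsBlank c = false := by
  simp only [bIsBreak, Bool.or_eq_true, beq_iff_eq] at h
  rcases h with h | h <;> subst h <;> rfl

theorem blank_isspace (c : Char) (h : bIsBlank c = true) : PySem.Chars.isspace c = true := by
  simp only [bIsBlank, Bool.or_eq_true, beq_iff_eq] at h
  rcases h with h | h <;> subst h <;> rfl

-- ---- the per-line equivalence ----
theorem matchAt_eq (target : List Char) (hT : PySem.Chars.rstrip target = target)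
    (s : List Char) (hDom : ∀ c ∈ s, pvDomChar c = true) :
    bMatchAt target s =
      pyTest target (target ++ [' ']) (target ++ ['(']) (s.takeWhile (fun c => !(pyB c))) := by
  have hlineDom : ∀ c ∈ s.takeWhile (fun c => !(pyB c)), pvDomChar c = true :=
    fun c hc => hDom c ((List.takeWhile_sublist _).subset hc)
  have hlineNB : ∀ c ∈ s.takeWhile (fun c => !(pyB c)), bIsBreak c = false := by
    intro c hc
    have h1 := List.mem_takeWhile_imp hc
    rw [dom_pyB c (hlineDom c hc)] at h1
    simpa using h1
  have hrest : s.dropWhile (fun c => !(pyB c)) = [] ∨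
      ∃ d r', s.dropWhile (fun c => !(pyB c)) = d :: r' ∧ bIsBreak d = true := by
    cases hre : s.dropWhile (fun c => !(pyB c)) with
    | nil => exact Or.inl rfl
    | cons d r' =>
      refine Or.inr ⟨d, r', rfl, ?_⟩
      have h1 := head_dropWhile_false _ _ _ _ hre
      have hdm : pvDomChar d = true := hDom d ((List.dropWhile_suffix _).subset (hre ▸ List.mem_cons_self))
      rw [dom_pyB d hdm] at h1
      simpa using h1
  have hsw : PySem.Chars.startswith s ['#', '#', ' '] =
      PySem.Chars.startswith (s.takeWhile (fun c => !(pyB c))) ['#', '#', ' '] := by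
    rw [Bool.eq_iff_iff, PySem.Chars.startswith_iff, PySem.Chars.startswith_iff]
    exact prefix_takeWhile_iff _ ['#', '#', ' '] (by intro c hc; fin_cases hc <;> rfl) s
  by_cases hg : PySem.Chars.startswith (s.takeWhile (fun c => !(pyB c))) ['#', '#', ' '] = true
  case neg =>
    simp only [Bool.not_eq_true] at hg
    simp [bMatchAt, pyTest, hsw, hg]
  case pos =>
    obtain ⟨t, ht⟩ := (PySem.Chars.startswith_iff _ _).mp hg
    -- s = '#' :: '#' :: ' ' :: (t ++ rest)
    have hs3 : s = '#' :: '#' :: ' ' :: (t ++ s.dropWhile (fun c => !(pyB c))) := by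
      conv_lhs => rw [← List.takeWhile_append_dropWhile (p := fun c => !(pyB c)) (l := s)]
      rw [← ht]
      rfl
    have htDom : ∀ c ∈ t, pvDomChar c = true := by
      intro c hc
      exact hlineDom c (by rw [← ht]; simp [hc])
    have htNB : ∀ c ∈ t, bIsBreak c = false := by
      intro c hc
      exact hlineNB c (by rw [← ht]; simp [hc])
    have hu : (t ++ s.dropWhile (fun c => !(pyB c))).dropWhile bIsBlank =
        t.dropWhile bIsBlank ++ s.dropWhile (fun c => !(pyB c)) := by
      rw [List.dropWhile_append]
      split_ifs with hemp
      · rw [List.isEmpty_iff.mp hemp, List.nil_append]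
        rcases hrest with h | ⟨d, r', hre, hd⟩
        · rw [h]
          rfl
        · rw [hre, List.dropWhile_cons, break_not_blank d hd]
          simp
      · rfl
    have hslice : PySem.Chars.slice (s.takeWhile (fun c => !(pyB c))) (some 3) none = t := by
      rw [← ht]
      simp [PySem.Chars.slice_eq_listSlice, PySem.List.slice_from _ (by norm_num : (0:Int) ≤ 3)]
    have hstrip : PySem.Chars.strip t = PySem.Chars.rstrip (t.dropWhile bIsBlank) := by
      simp only [PySem.Chars.strip, PySem.Chars.lstrip]
      rw [dropWhile_congr_mem t (fun c hc => dom_isspace c (htDom c hc) (htNB c hc))]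
    -- A's per-line value in terms of u₀ := t.dropWhile bIsBlank
    have hA : pyTest target (target ++ [' ']) (target ++ ['(']) (s.takeWhile (fun c => !(pyB c))) =
        (if PySem.Chars.rstrip (PySem.Chars.lower (t.dropWhile bIsBlank)) == target then true
         else PySem.Chars.startswith (PySem.Chars.rstrip (PySem.Chars.lower (t.dropWhile bIsBlank))) (target ++ [' ']) ||
              PySem.Chars.startswith (PySem.Chars.rstrip (PySem.Chars.lower (t.dropWhile bIsBlank))) (target ++ ['('])) := by
      simp only [pyTest, hg, Bool.not_true, Bool.false_eq_true, if_false, hslice, hstrip, lower_rstrip]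
    rw [hA]
    -- B's value
    have hgs : PySem.Chars.startswith s ['#', '#', ' '] = true := by rw [hsw]; exact hg
    have hB0 : bMatchAt target s = bMatchAt target ('#' :: '#' :: ' ' :: (t ++ s.dropWhile (fun c => !(pyB c)))) := by
      rw [← hs3]
    rw [hB0]
    have hgX : PySem.Chars.startswith ('#' :: '#' :: ' ' :: (t ++ s.dropWhile (fun c => !(pyB c)))) ['#', '#', ' '] = true := by
      simp [PySem.Chars.startswith, List.isPrefixOf]
    simp only [bMatchAt, hgX, Bool.not_true, Bool.false_eq_true, if_false, List.drop_succ_cons,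
      List.drop_zero, hu]
    rw [bMatchTarget_spec target (t.dropWhile bIsBlank) (s.dropWhile (fun c => !(pyB c)))
      (fun c hc => htNB c ((List.dropWhile_suffix _).subset hc)) hrest]
    -- core case analysis
    have hu₀Dom : ∀ c ∈ t.dropWhile bIsBlank, pvDomChar c = true :=
      fun c hc => htDom c ((List.dropWhile_suffix _).subset hc)
    have hu₀NB : ∀ c ∈ t.dropWhile bIsBlank, bIsBreak c = false :=
      fun c hc => htNB c ((List.dropWhile_suffix _).subset hc)
    by_cases hpre : target <+: PySem.Chars.lower (t.dropWhile bIsBlank)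
    case neg =>
      rw [if_neg hpre]
      have h1 : ¬ target <+: PySem.Chars.rstrip (PySem.Chars.lower (t.dropWhile bIsBlank)) :=
        fun h => hpre (h.trans (rstrip_prefix _))
      have hne : (PySem.Chars.rstrip (PySem.Chars.lower (t.dropWhile bIsBlank)) == target) = false := by
        rw [beq_eq_false_iff_ne]
        intro habs
        exact h1 (habs ▸ List.prefix_refl _)
      have hsp : PySem.Chars.startswith (PySem.Chars.rstrip (PySem.Chars.lower (t.dropWhile bIsBlank))) (target ++ [' ']) = false := by
        rw [← Bool.not_eq_true, PySem.Chars.startswith_iff]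
        intro h3
        exact h1 ((List.prefix_append target [' ']).trans h3)
      have hpa : PySem.Chars.startswith (PySem.Chars.rstrip (PySem.Chars.lower (t.dropWhile bIsBlank))) (target ++ ['(']) = false := by
        rw [← Bool.not_eq_true, PySem.Chars.startswith_iff]
        intro h3
        exact h1 ((List.prefix_append target ['(']).trans h3)
      rw [hne, hsp, hpa]
      simp only [Bool.false_eq_true, if_false, Bool.or_self]
    case pos =>
      rw [if_pos hpre]
      have heq : target ++ (PySem.Chars.lower (t.dropWhile bIsBlank)).drop target.length =
          PySem.Chars.lower (t.dropWhile bIsBlank) := List.prefix_iff_eq_append.mp hpre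
      have hlw : PySem.Chars.lower ((t.dropWhile bIsBlank).drop target.length) =
          (PySem.Chars.lower (t.dropWhile bIsBlank)).drop target.length := by
        simp [PySem.Chars.lower, List.map_drop]
      have hwDom : ∀ c ∈ (t.dropWhile bIsBlank).drop target.length, pvDomChar c = true :=
        fun c hc => hu₀Dom c (List.drop_subset _ _ hc)
      have hwNB : ∀ c ∈ (t.dropWhile bIsBlank).drop target.length, bIsBreak c = false :=
        fun c hc => hu₀NB c (List.drop_subset _ _ hc)
      have hrl : PySem.Chars.rstrip (PySem.Chars.lower (t.dropWhile bIsBlank)) =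
          if PySem.Chars.rstrip (PySem.Chars.lower ((t.dropWhile bIsBlank).drop target.length)) = []
          then target
          else target ++ PySem.Chars.rstrip (PySem.Chars.lower ((t.dropWhile bIsBlank).drop target.length)) := by
        conv_lhs => rw [← heq, ← hlw]
        rw [rstrip_append, hT]
      by_cases hwsp : PySem.Chars.rstrip (PySem.Chars.lower ((t.dropWhile bIsBlank).drop target.length)) = []
      · rw [if_pos hwsp] at hrl
        rw [hrl]
        simp only [beq_self_eq_true, if_true]
        have hallbl : ∀ c ∈ (t.dropWhile bIsBlank).drop target.length, bIsBlank c = true := by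
          intro c hc
          have h5 := (rstrip_eq_nil _).mp hwsp (PySem.Chars.lowerChar c)
            (by simp only [PySem.Chars.lower]; exact List.mem_map_of_mem hc)
          rw [isspace_lowerChar] at h5
          rw [← dom_isspace c (hwDom c hc) (hwNB c hc)]
          exact h5
        by_cases hwnil : (t.dropWhile bIsBlank).drop target.length = []
        · rw [hwnil]
          simp only [List.nil_append]
          rcases hrest with h | ⟨d, r', hre, hd⟩
          · rw [h]
          · rw [hre]
            simp [hd]
        · obtain ⟨c, w'', hwc⟩ := List.exists_cons_of_ne_nil hwnil
          rw [hwc]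
          simp only [List.cons_append]
          have hcbl : bIsBlank c = true := hallbl c (by rw [hwc]; simp)
          simp only [bIsBlank, Bool.or_eq_true, beq_iff_eq] at hcbl
          have hdw : List.dropWhile bIsBlank (c :: (w'' ++ s.dropWhile (fun c => !(pyB c)))) =
              s.dropWhile (fun c => !(pyB c)) := by
            rw [← List.cons_append, ← hwc]
            rw [List.dropWhile_append, if_pos (by rw [List.isEmpty_iff]; exact List.dropWhile_eq_nil_iff.mpr hallbl)]
            rcases hrest with h | ⟨d, r', hre, hd⟩
            · rw [h]
              rfl
            · rw [hre, List.dropWhile_cons, break_not_blank d hd]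
              simp
          rcases hcbl with hc' | hc'
          · subst hc'
            simp
          · subst hc'
            rw [show (bIsBreak '\t' || ('\t' == '(') || ('\t' == ' ')) = false from rfl]
            simp only [Bool.false_eq_true, if_false, hdw]
            rcases hrest with h | ⟨d, r', hre, hd⟩
            · rw [h]
            · rw [hre]
              simp [hd]
      · rw [if_neg hwsp] at hrl
        have hwne : (t.dropWhile bIsBlank).drop target.length ≠ [] := by
          intro h0
          rw [h0] at hwsp
          exact hwsp rfl
        obtain ⟨c, w'', hwc⟩ := List.exists_cons_of_ne_nil hwne
        have hcNB : bIsBreak c = false := hwNB c (by rw [hwc]; simp)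
        have hz : ∃ z, PySem.Chars.rstrip (PySem.Chars.lower ((t.dropWhile bIsBlank).drop target.length)) =
            PySem.Chars.lowerChar c :: z := by
          rw [hwc] at hwsp ⊢
          rw [show PySem.Chars.lower (c :: w'') = [PySem.Chars.lowerChar c] ++ PySem.Chars.lower w'' from rfl] at hwsp ⊢
          rw [rstrip_append] at hwsp ⊢
          split_ifs at hwsp ⊢ with h2
          · rw [rstrip_singleton] at hwsp ⊢
            split_ifs at hwsp ⊢ with h3
            · exact absurd rfl hwsp
            · exact ⟨[], rfl⟩
          · exact ⟨_, rfl⟩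
        obtain ⟨z, hzz⟩ := hz
        rw [hzz] at hrl
        have hAne : (PySem.Chars.rstrip (PySem.Chars.lower (t.dropWhile bIsBlank)) == target) = false := by
          rw [hrl, beq_eq_false_iff_ne]
          intro habs
          have h6 : PySem.Chars.lowerChar c :: z = ([] : List Char) := by
            apply List.append_cancel_left (as := target)
            rw [habs, List.append_nil]
          cases h6
        have hAsp : PySem.Chars.startswith (PySem.Chars.rstrip (PySem.Chars.lower (t.dropWhile bIsBlank))) (target ++ [' ']) = (c == ' ') := by
          rw [hrl, Bool.eq_iff_iff, PySem.Chars.startswith_iff, List.prefix_append_right_inj,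
            List.cons_prefix_cons]
          constructor
          · rintro ⟨h9, -⟩
            exact beq_iff_eq.mpr ((lowerChar_eq_space c).mp h9.symm)
          · intro h9
            exact ⟨((lowerChar_eq_space c).mpr (beq_iff_eq.mp h9)).symm, List.nil_prefix⟩
        have hApa : PySem.Chars.startswith (PySem.Chars.rstrip (PySem.Chars.lower (t.dropWhile bIsBlank))) (target ++ ['(']) = (c == '(') := by
          rw [hrl, Bool.eq_iff_iff, PySem.Chars.startswith_iff, List.prefix_append_right_inj,
            List.cons_prefix_cons]
          constructor
          · rintro ⟨h9, -⟩
            exact beq_iff_eq.mpr ((lowerChar_eq_paren c).mp h9.symm)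
          · intro h9
            exact ⟨((lowerChar_eq_paren c).mpr (beq_iff_eq.mp h9)).symm, List.nil_prefix⟩
        rw [hAne, hAsp, hApa]
        simp only [Bool.false_eq_true, if_false]
        rw [hwc]
        simp only [List.cons_append]
        by_cases hcs : c = ' '
        · subst hcs
          rfl
        · by_cases hcp : c = '('
          · subst hcp
            rfl
          · have hif : (bIsBreak c || (c == '(') || (c == ' ')) = false := by
              simp [hcNB, hcs, hcp]
            rw [hif]
            simp only [Bool.false_eq_true, if_false]
            have hex : ∃ e ∈ (t.dropWhile bIsBlank).drop target.length, PySem.Chars.isspace e = false := by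
              by_contra hno
              push Not at hno
              apply hwsp
              rw [rstrip_eq_nil]
              intro ch hch
              simp only [PySem.Chars.lower, List.mem_map] at hch
              obtain ⟨e, he, rfl⟩ := hch
              rw [isspace_lowerChar]
              have := hno e he
              simpa using this
            have hne2 : ((t.dropWhile bIsBlank).drop target.length).dropWhile bIsBlank ≠ [] := by
              intro h0
              obtain ⟨e, he, hesp⟩ := hex
              have := List.dropWhile_eq_nil_iff.mp h0 e he
              rw [blank_isspace e this] at hesp
              cases hesp
            obtain ⟨e, tail, het⟩ := List.exists_cons_of_ne_nil hne2
            have heNB : bIsBreak e = false :=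
              hwNB e ((List.dropWhile_suffix _).subset (by rw [het]; simp))
            have hbig : List.dropWhile bIsBlank (c :: (w'' ++ s.dropWhile (fun c => !(pyB c)))) =
                e :: (tail ++ s.dropWhile (fun c => !(pyB c))) := by
              rw [← List.cons_append, ← hwc, List.dropWhile_append]
              rw [if_neg (by rw [List.isEmpty_iff]; exact het ▸ (by simp))]
              rw [het]
              rfl
            rw [hbig]
            have h7 : (c == ' ') = false := beq_eq_false_iff_ne.mpr hcs
            have h8 : (c == '(') = false := beq_eq_false_iff_ne.mpr hcp
            rw [h7, h8]
            show bIsBreak e = (false || false)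
            rw [heNB]
            rfl

-- ---- the scan equivalence ----
theorem scan_eq (target : List Char) (hT : PySem.Chars.rstrip target = target) :
    ∀ (s : List Char), (∀ c ∈ s, pvDomChar c = true) →
      bScan target s =
        hasSecLoop target (target ++ [' ']) (target ++ ['(']) (PySem.Chars.splitlines s) := by
  have main : ∀ (n : Nat) (s : List Char), s.length = n → (∀ c ∈ s, pvDomChar c = true) →
      bScan target s = hasSecLoop target (target ++ [' ']) (target ++ ['(']) (PySem.Chars.splitlines s) := by
    intro n
    induction n using Nat.strong_induction_on with
    | _ n ih =>
      intro s hlen hDom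
      have hcong : s.dropWhile (fun c => !(bIsBreak c)) = s.dropWhile (fun c => !(pyB c)) :=
        dropWhile_congr_mem s (fun c hc => by simp [dom_pyB c (hDom c hc)])
      rcases s with _ | ⟨a, s'⟩
      · rw [bScan.eq_def]
        simp [bMatchAt, PySem.Chars.startswith]
        rfl
      · rw [splitlines_eq_go, go_closed (a :: s') [] []]
        rw [if_neg (by simp)]
        rw [← splitlines_eq_go]
        rw [hasSecLoop_cons]
        simp only [List.reverse_nil, List.nil_append]
        rw [← matchAt_eq target hT (a :: s') hDom]
        rw [bScan.eq_def]
        by_cases hm : bMatchAt target (a :: s')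
        · simp [hm]
        · simp only [hm, Bool.false_eq_true, if_false, Bool.false_or]
          rw [hcong]
          have hsuf : (a :: s').dropWhile (fun c => !(pyB c)) <:+ (a :: s') :=
            List.dropWhile_suffix _
          cases hd : (a :: s').dropWhile (fun c => !(pyB c)) with
          | nil => rfl
          | cons d r =>
            rw [hd] at hsuf
            have hlen2 : r.length + 1 ≤ n := by
              have h5 := hsuf.length_le
              simp only [List.length_cons] at h5 hlen
              omega
            have hdomr : ∀ c ∈ slTail (d :: r), pvDomChar c = true := by
              intro c hc
              have h1 : c ∈ d :: r := (slTail_tail_suffix d r).subset hc |> (List.subset_cons_self d r)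
              exact hDom c (hsuf.subset h1)
            have hstep : bScan target (slTail (d :: r)) =
                hasSecLoop target (target ++ [' ']) (target ++ ['(']) (PySem.Chars.splitlines (slTail (d :: r))) := by
              apply ih (slTail (d :: r)).length _ _ rfl hdomr
              have := (slTail_tail_suffix d r).length_le
              omega
            split
            next heq => cases heq
            next rr heq =>
              injection heq with h1 h2
              subst h1; subst h2
              rw [show slTail ('\r' :: '\n' :: rr) = rr from slTail_pair rr] at hstep hdomr ⊢
              exact hstep
            next c' rr hnot heq =>
              injection heq with h1 h2
              subst h1; subst h2
              rw [slTail_gen _ _ (by rintro ⟨hc, z, hz⟩; exact hnot z hc hz)] at hstep hdomr ⊢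
              exact hstep
  intro s hDom
  exact main s.length s rfl hDom

-- ===== VERDICT (by name: the statement is the Claim_ definition above) =====
theorem has_section_spec : Claim_equal_has_section := by
  intro body heading hdom
  unfold Spec_has_section has_section has_section_alt
  have hb : ∀ c ∈ body.toList, pvDomChar c = true := by
    have h2 := hdom
    unfold Dom_has_section pvDomStr at h2
    simp only [Bool.and_eq_true, List.all_eq_true] at h2
    exact fun c hc => h2.1 c hc
  exact (scan_eq _ (rstrip_target heading.toList) body.toList hb).symm
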